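-- pv_equiv track=rewrite | github.com/MateuszLeo/AoC2019 | 4/solution.py | part_2
-- ===== SOURCE A (Python) =====
-- from typing import Tuple
--
-- def part_1(lower_bound: int, upper_bound: int) -> Tuple[int, set]:
--     numbers = set()
--     for n in range(lower_bound, upper_bound):
--         string = str(n)
--         string_list = list(string)
--         if sorted(string_list) == string_list:
--             for s in string:
--                 same = f"{s}{s}"
--                 if same in string:
--                     numbers.add(n)
--     return len(numbers), numbers
--
-- def part_2(lower_bound: int, upper_bound: int) -> int:
--     _, part_1_numbers = part_1(lower_bound, upper_bound)
--
--     numbers = set()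
--     for n in part_1_numbers:
--         string = str(n)
--         for char in string:
--             if len("".join(string.split(sep=char))) == 4:
--                 numbers.add(n)
--
--     return len(numbers)
-- ===== SOURCE B (Python) =====
-- def part_2(lower_bound: int, upper_bound: int) -> int:
--     total = 0
--     for n in range(lower_bound, upper_bound):
--         s = str(n)
--         pairs = list(zip(s, s[1:]))
--         if all(a <= b for a, b in pairs) and any(a == b for a, b in pairs) \
--                 and any(len([d for d in s if d != c]) == 4 for c in s):
--             total += 1
--     return total
-- ===== Notes on version B (the rewrite author's own statement) =====
-- stated objective: simpler
-- what changed: B replaces A's two-phase pipeline (sort each digit string, doubled-substring search, split/join length trick, two intermediate sets) by a single counting pass that checks adjacent digit pairs via zip and a filtered-out-character length directly.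
import Mathlib
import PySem

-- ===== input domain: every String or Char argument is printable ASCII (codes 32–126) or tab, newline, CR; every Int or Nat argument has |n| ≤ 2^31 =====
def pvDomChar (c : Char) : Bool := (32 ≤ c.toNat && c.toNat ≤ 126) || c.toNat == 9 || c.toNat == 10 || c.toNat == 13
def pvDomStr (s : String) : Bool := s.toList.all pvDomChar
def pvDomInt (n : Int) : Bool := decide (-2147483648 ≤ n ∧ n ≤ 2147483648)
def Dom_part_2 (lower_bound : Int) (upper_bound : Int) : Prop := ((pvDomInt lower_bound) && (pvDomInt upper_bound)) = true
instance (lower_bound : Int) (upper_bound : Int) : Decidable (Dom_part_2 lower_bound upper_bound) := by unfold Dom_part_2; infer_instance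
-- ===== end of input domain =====

-- B replaces the sort/set/split-join pipeline by a single counting pass over the range
-- that checks adjacent digit pairs and a filtered length directly (objective: simpler).
-- ===== PORT A =====
def part_1 (lower_bound : Int) (upper_bound : Int) : Int × PySem.Set Int :=
  let numbers : PySem.Set Int :=
    (PySem.List.pyRange lower_bound upper_bound).foldl (fun numbers n =>
      let string := PySem.Int.toChars n
      let string_list := string
      if PySem.List.sorted string_list (fun x => x) == string_list then
        string.foldl (fun numbers s =>
          let same : List Char := [s, s]
          if PySem.Chars.isIn same string then PySem.Set.add numbers n else numbers) numbers
      else numbers) PySem.Set.empty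
  (PySem.Set.len numbers, numbers)

def part_2 (lower_bound : Int) (upper_bound : Int) : Int :=
  let part_1_numbers := (part_1 lower_bound upper_bound).2
  let numbers : PySem.Set Int :=
    part_1_numbers.foldl (fun numbers n =>
      let string := PySem.Int.toChars n
      string.foldl (fun numbers char =>
        if PySem.Chars.len (PySem.Chars.join [] (PySem.Chars.splitOn string [char])) == 4 then
          PySem.Set.add numbers n
        else numbers) numbers) PySem.Set.empty
  PySem.Set.len numbers

-- ===== PORT B =====
def part_2_alt (lower_bound : Int) (upper_bound : Int) : Int :=
  (PySem.List.pyRange lower_bound upper_bound).foldl (fun total n =>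
    let s := PySem.Int.toChars n
    let pairs := s.zip (PySem.Chars.slice s (some 1) none)
    if (pairs.all (fun p => decide (p.1 ≤ p.2)) && pairs.any (fun p => p.1 == p.2))
        && s.any (fun c => ((s.filter (fun d => d != c)).length : Int) == 4)
    then total + 1 else total) 0

-- ===== PRECONDITION & SPEC =====
def Spec_part_2 (lower_bound : Int) (upper_bound : Int) (out : Int) : Prop := out = part_2_alt lower_bound upper_bound
instance (lower_bound : Int) (upper_bound : Int) (out : Int) : Decidable (Spec_part_2 lower_bound upper_bound out) := by unfold Spec_part_2; infer_instance

-- ===== CLAIM (what is proved, stated in full; the proofs are below) =====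
def Claim_equal_part_2 : Prop := ∀ (lower_bound : Int) (upper_bound : Int), Dom_part_2 lower_bound upper_bound → Spec_part_2 lower_bound upper_bound (part_2 lower_bound upper_bound)

-- ===== LEMMAS AND PROOFS =====

-- A's per-number tests, named for the proofs
def pA1 (n : Int) : Bool :=
  (PySem.List.sorted (PySem.Int.toChars n) (fun x => x) == PySem.Int.toChars n)
    && (PySem.Int.toChars n).any (fun c => PySem.Chars.isIn [c, c] (PySem.Int.toChars n))

def pA2 (n : Int) : Bool :=
  (PySem.Int.toChars n).any (fun c =>
    PySem.Chars.len (PySem.Chars.join [] (PySem.Chars.splitOn (PySem.Int.toChars n) [c])) == 4)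

def pB (n : Int) : Bool :=
  (((PySem.Int.toChars n).zip (PySem.Chars.slice (PySem.Int.toChars n) (some 1) none)).all (fun p => decide (p.1 ≤ p.2))
      && ((PySem.Int.toChars n).zip (PySem.Chars.slice (PySem.Int.toChars n) (some 1) none)).any (fun p => p.1 == p.2))
    && (PySem.Int.toChars n).any (fun c => (((PySem.Int.toChars n).filter (fun d => d != c)).length : Int) == 4)

-- a fold that only ever adds n leaves a set already containing n unchanged
theorem fold_add_mem {q : Char → Bool} (n : Int) (cs : List Char) (S : PySem.Set Int)
    (h : n ∈ S) :
    cs.foldl (fun S c => if q c then PySem.Set.add S n else S) S = S := by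
  induction cs with
  | nil => rfl
  | cons c cs ih =>
    simp only [List.foldl_cons]
    split
    · rw [PySem.Set.add_of_mem h]; exact ih
    · exact ih

-- the inner char loop adds n exactly when some char passes the test
theorem fold_add_any {q : Char → Bool} (n : Int) (cs : List Char) (S : PySem.Set Int) :
    cs.foldl (fun S c => if q c then PySem.Set.add S n else S) S
      = if cs.any q then PySem.Set.add S n else S := by
  induction cs generalizing S with
  | nil => rfl
  | cons c cs ih =>
    simp only [List.foldl_cons, List.any_cons]
    by_cases hc : q c = true
    · simp only [hc, if_true, Bool.true_or]
      exact fold_add_mem n cs _ ((PySem.Set.mem_add S n n).mpr (Or.inr rfl))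
    · simp only [hc, Bool.false_or, ih]
      cases cs.any q <;> simp

-- a fold that conditionally adds fresh distinct elements builds exactly the filter
theorem fold_filter {p : Int → Bool} (xs : List Int) (S : PySem.Set Int)
    (hnd : xs.Nodup) (hdisj : ∀ x ∈ xs, x ∉ S) :
    xs.foldl (fun S n => if p n then PySem.Set.add S n else S) S = S ++ xs.filter p := by
  induction xs generalizing S with
  | nil => simp
  | cons x xs ih =>
    simp only [List.foldl_cons, List.filter_cons]
    have hx : x ∉ S := hdisj x (List.mem_cons_self)
    have hnd' : xs.Nodup := (List.nodup_cons.mp hnd).2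
    by_cases hp : p x = true
    · rw [if_pos hp, if_pos hp, PySem.Set.add_of_not_mem hx,
        ih _ hnd' (fun y hy hmem => by
          rcases List.mem_append.mp hmem with h | h
          · exact hdisj y (List.mem_cons_of_mem _ hy) h
          · have hyx : y = x := by simpa using h
            exact (List.nodup_cons.mp hnd).1 (hyx ▸ hy))]
      simp
    · rw [if_neg hp, if_neg hp, ih _ hnd' (fun y hy => hdisj y (List.mem_cons_of_mem _ hy))]

-- flattening splitOn.go for a single-char separator removes exactly that char
theorem go_flatten (c : Char) (fuel : Nat) (l cur : List Char) (acc : List (List Char))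
    (h : l.length < fuel) :
    (PySem.Chars.splitOn.go [c] fuel l cur acc).flatten
      = acc.reverse.flatten ++ cur.reverse ++ l.filter (fun d => d != c) := by
  induction fuel generalizing l cur acc with
  | zero => omega
  | succ fuel ih =>
    cases l with
    | nil => simp [PySem.Chars.splitOn.go]
    | cons c' rest =>
      simp only [PySem.Chars.splitOn.go]
      by_cases hc : c = c'
      · subst hc
        rw [if_pos (by simp [List.isPrefixOf])]
        rw [ih _ _ _ (by simp at h ⊢; omega)]
        simp
      · rw [if_neg (by simp [List.isPrefixOf]; exact hc)]
        rw [ih _ _ _ (by simp at h ⊢; omega)]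
        simp [Ne.symm hc]

theorem join_splitOn_single (s : List Char) (c : Char) :
    PySem.Chars.join [] (PySem.Chars.splitOn s [c]) = s.filter (fun d => d != c) := by
  have hfl : ∀ parts : List (List Char), PySem.Chars.join ([] : List Char) parts = parts.flatten := by
    intro parts
    induction parts with
    | nil => rfl
    | cons p ps ih => simp [PySem.Chars.join, List.intercalate] at ih ⊢; cases ps <;> simp_all [List.intersperse]
  rw [hfl, PySem.Chars.splitOn, go_flatten c _ s [] [] (by omega)]
  simp

theorem pA2_eq_pB2 (s : List Char) :
    (s.any (fun c => PySem.Chars.len (PySem.Chars.join [] (PySem.Chars.splitOn s [c])) == 4))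
      = s.any (fun c => ((s.filter (fun d => d != c)).length : Int) == 4) := by
  congr 1
  funext c
  rw [join_splitOn_single, PySem.Chars.len_eq]

-- membership in zip(s, s[1:]) names an adjacent pair of s
theorem mem_zip_tail (s : List Char) (p : Char × Char) :
    p ∈ s.zip (PySem.Chars.slice s (some 1) none)
      ↔ ∃ (i : Nat) (h : i + 1 < s.length), s[i] = p.1 ∧ s[i + 1] = p.2 := by
  rw [show PySem.Chars.slice s (some 1) none = s.drop 1 by
    simp [PySem.Chars.slice_eq_listSlice, PySem.List.slice_from s (by norm_num : (0:Int) ≤ 1)]]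
  constructor
  · intro hp
    rcases List.mem_iff_getElem.mp hp with ⟨i, hi, hgep⟩
    have hlen : i + 1 < s.length := by
      simp only [List.length_zip, List.length_drop] at hi; omega
    refine ⟨i, hlen, ?_, ?_⟩ <;>
      (rw [← hgep]; simp [List.getElem_zip]; try omega)
  · rintro ⟨i, h, h1, h2⟩
    apply List.mem_iff_getElem.mpr
    refine ⟨i, by simp only [List.length_zip, List.length_drop]; omega, ?_⟩
    simp only [List.getElem_zip, List.getElem_drop]
    rw [Prod.ext_iff]
    exact ⟨h1, by rw [← h2]; exact getElem_congr rfl (by omega) (by omega)⟩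

-- sortedness check = all adjacent pairs non-decreasing
theorem sorted_eq_pairs (s : List Char) :
    (PySem.List.sorted s (fun x => x) == s)
      = (s.zip (PySem.Chars.slice s (some 1) none)).all (fun p => decide (p.1 ≤ p.2)) := by
  rw [Bool.eq_iff_iff]
  simp only [beq_iff_eq, List.all_eq_true]
  constructor
  · intro h p hp
    rcases (mem_zip_tail s p).mp hp with ⟨i, hlen, h1, h2⟩
    have hpw : List.Pairwise (fun a b : Char => a ≤ b) s := by
      have hsp := PySem.List.sorted_pairwise s (fun x : Char => x)
      rw [h] at hsp
      exact hsp
    have hle := List.pairwise_iff_getElem.mp hpw i (i + 1) (by omega) hlen (by omega)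
    rw [← h1, ← h2]
    exact decide_eq_true hle
  · intro h
    apply PySem.List.sorted_eq_self_of_pairwise
    rw [← List.isChain_iff_pairwise, List.isChain_iff_getElem]
    intro i hlen
    have := h (s[i], s[i + 1]) ((mem_zip_tail s _).mpr ⟨i, by omega, rfl, rfl⟩)
    simpa using this

-- doubled-substring check = some adjacent pair equal
theorem double_eq_pairs (s : List Char) :
    (s.any (fun c => PySem.Chars.isIn [c, c] s))
      = (s.zip (PySem.Chars.slice s (some 1) none)).any (fun p => p.1 == p.2) := by
  rw [Bool.eq_iff_iff]
  simp only [List.any_eq_true, PySem.Chars.isIn_iff_infix, beq_iff_eq]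
  constructor
  · rintro ⟨c, hc, u, v, huv⟩
    rw [List.append_assoc] at huv
    subst huv
    refine ⟨(c, c), (mem_zip_tail _ _).mpr ⟨u.length, ?_, ?_, ?_⟩, rfl⟩
    · simp
    · rw [List.getElem_append_right (by simp)]
      simp
    · rw [List.getElem_append_right (by simp)]
      simp
  · rintro ⟨⟨a, b⟩, hp, hab⟩
    rcases (mem_zip_tail s _).mp hp with ⟨i, hlen, h1, h2⟩
    dsimp at hab
    subst hab
    have h1' : s[i] = a := h1
    have h2' : s[i + 1] = a := h2
    refine ⟨a, h1' ▸ List.getElem_mem _, ?_⟩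
    have hdrop : s.drop i = a :: a :: s.drop (i + 2) := by
      rw [List.drop_eq_getElem_cons (by omega), List.drop_eq_getElem_cons (by omega), h1', h2']
    have hpre : [a, a] <+: s.drop i := by
      rw [hdrop]; exact ⟨s.drop (i + 2), rfl⟩
    exact hpre.isInfix.trans (List.drop_suffix i s).isInfix

theorem pointwise (n : Int) : (pA2 n && pA1 n) = pB n := by
  unfold pA1 pA2 pB
  rw [pA2_eq_pB2, sorted_eq_pairs, double_eq_pairs, Bool.and_comm]

theorem part1_set (lower_bound upper_bound : Int) :
    (part_1 lower_bound upper_bound).2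
      = (PySem.List.pyRange lower_bound upper_bound).filter pA1 := by
  unfold part_1
  dsimp only
  rw [PySem.List.foldl_congr_mem _ _
      (fun (numbers : PySem.Set Int) (n : Int) => if pA1 n then PySem.Set.add numbers n else numbers) _
      (fun S n _ => by
        rw [fold_add_any]
        unfold pA1
        by_cases h1 : (PySem.List.sorted (PySem.Int.toChars n) (fun x => x) == PySem.Int.toChars n) = true <;>
          simp [h1])]
  rw [fold_filter _ _ (PySem.List.nodup_pyRange_one _ _) (by simp [PySem.Set.empty])]
  simp [PySem.Set.empty]

theorem part2_eq_countP (lower_bound upper_bound : Int) :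
    part_2 lower_bound upper_bound
      = ((PySem.List.pyRange lower_bound upper_bound).countP (fun n => pA2 n && pA1 n) : Int) := by
  unfold part_2
  dsimp only
  rw [part1_set]
  rw [PySem.List.foldl_congr_mem _ _
      (fun (numbers : PySem.Set Int) (n : Int) => if pA2 n then PySem.Set.add numbers n else numbers) _
      (fun S n _ => by rw [fold_add_any]; rfl)]
  rw [fold_filter _ _ (List.Nodup.filter _ (PySem.List.nodup_pyRange_one _ _)) (by simp [PySem.Set.empty])]
  simp only [PySem.Set.empty, List.nil_append, PySem.Set.len, List.filter_filter, ← List.countP_eq_length_filter]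

theorem alt_eq_countP (lower_bound upper_bound : Int) :
    part_2_alt lower_bound upper_bound
      = ((PySem.List.pyRange lower_bound upper_bound).countP pB : Int) := by
  show List.foldl (fun total n => if pB n = true then total + 1 else total) 0 _ = _
  rw [PySem.List.foldl_count_if pB]
  simp

-- ===== VERDICT (by name: the statement is the Claim_ definition above) =====
theorem part_2_spec : Claim_equal_part_2 := by
  intro lower_bound upper_bound _
  unfold Spec_part_2
  rw [part2_eq_countP, alt_eq_countP]
  congr 1
  exact List.countP_congr (fun n _ => by rw [pointwise])
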